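-- pv_equiv track=rewrite | github.com/mechawrench/wificom-lib | lib/wificom/punchbag.py | count_tabs
-- ===== SOURCE A (Python) =====
-- NO_CONTENT = -1
--
-- LEADING_SPACE = -2
--
-- def count_tabs(line):
-- 	'''
-- 	Count leading tabs on line.
-- 	NO_CONTENT for comment, blank line, or tabs only.
-- 	LEADING_SPACE if a space was found before text begins.
-- 	'''
-- 	tabs = 0
-- 	for character in line:
-- 		if character == "\t":
-- 			tabs += 1
-- 		elif character in "#\r\n":
-- 			return NO_CONTENT
-- 		elif character == " ":
-- 			return LEADING_SPACE
-- 		else: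
-- 			return tabs
-- 	return NO_CONTENT
-- ===== SOURCE B (Python) =====
-- NO_CONTENT = -1
--
-- LEADING_SPACE = -2
--
-- def count_tabs(line):
-- 	'''
-- 	Count leading tabs on line.
-- 	NO_CONTENT for comment, blank line, or tabs only.
-- 	LEADING_SPACE if a space was found before text begins.
-- 	'''
-- 	stripped = line.lstrip("\t")
-- 	if not stripped:
-- 		return NO_CONTENT
-- 	first = stripped[0]
-- 	if first in "#\r\n":
-- 		return NO_CONTENT
-- 	if first == " ":
-- 		return LEADING_SPACE
-- 	return len(line) - len(stripped)
-- ===== Notes on version B (the rewrite author's own statement) =====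
-- stated objective: simpler
-- what changed: Replaces the accumulating per-character counter loop with a single left-strip of leading tab characters plus one inspection of the first remaining character, deriving the tab count as a length difference.
import Mathlib
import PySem

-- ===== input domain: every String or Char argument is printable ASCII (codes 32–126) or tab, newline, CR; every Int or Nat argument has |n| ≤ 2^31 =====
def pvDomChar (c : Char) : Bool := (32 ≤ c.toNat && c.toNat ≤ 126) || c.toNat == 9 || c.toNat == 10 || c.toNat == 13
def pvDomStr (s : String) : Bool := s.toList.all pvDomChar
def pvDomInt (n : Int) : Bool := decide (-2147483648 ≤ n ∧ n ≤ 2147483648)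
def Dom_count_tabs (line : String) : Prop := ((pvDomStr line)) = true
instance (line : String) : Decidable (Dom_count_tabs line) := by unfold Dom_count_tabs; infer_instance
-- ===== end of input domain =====

-- B replaces A's accumulating counter loop by lstrip("\t") + one first-character test (simpler decomposition).

-- ===== PORT A =====
-- the for-loop with its 'tabs' accumulator, early returns transcribed as results
def count_tabs_go : List Char → Int → Int
  | [], _ => -1
  | c :: rest, tabs =>
    if c == '\t' then count_tabs_go rest (tabs + 1)
    else if c == '#' || c == '\r' || c == '\n' then -1
    else if c == ' ' then -2
    else tabs

def count_tabs (line : String) : Int := count_tabs_go line.toList 0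

-- ===== PORT B =====
-- lstrip("\t") is exactly dropWhile (· == '\t') on the code points (exact: single strip char)
def count_tabs_alt (line : String) : Int :=
  let cs := line.toList
  let stripped := cs.dropWhile (· == '\t')
  match stripped with
  | [] => -1
  | first :: _ =>
    if first == '#' || first == '\r' || first == '\n' then -1
    else if first == ' ' then -2
    else (cs.length : Int) - (stripped.length : Int)

-- ===== PRECONDITION & SPEC =====
def Spec_count_tabs (line : String) (out : Int) : Prop := out = count_tabs_alt line
instance (line : String) (out : Int) : Decidable (Spec_count_tabs line out) := by unfold Spec_count_tabs; infer_instance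

-- ===== CLAIM (what is proved, stated in full; the proofs are below) =====
def Claim_equal_count_tabs : Prop := ∀ (line : String), Dom_count_tabs line → Spec_count_tabs line (count_tabs line)

-- ===== LEMMAS AND PROOFS =====
lemma count_tabs_go_eq (cs : List Char) : ∀ (tabs : Int),
    count_tabs_go cs tabs =
      (match cs.dropWhile (· == '\t') with
       | [] => -1
       | first :: _ =>
         if first == '#' || first == '\r' || first == '\n' then -1
         else if first == ' ' then -2
         else tabs + ((cs.length : Int) - ((cs.dropWhile (· == '\t')).length : Int))) := by
  induction cs with
  | nil => intro tabs; simp [count_tabs_go]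
  | cons c rest ih =>
    intro tabs
    by_cases hc : c = '\t'
    · subst hc
      simp only [count_tabs_go, List.dropWhile_cons, beq_self_eq_true, if_true, ih (tabs + 1),
        List.length_cons]
      have hlen : ((rest.dropWhile (· == '\t')).length : Int) ≤ (rest.length : Int) := by
        exact_mod_cast List.length_dropWhile_le _ _
      rcases hdw : rest.dropWhile (· == '\t') with _ | ⟨f, t⟩
      · simp
      · simp only [hdw] at *
        split_ifs
        · rfl
        · rfl
        · push_cast; ring
    · have hbeq : (c == '\t') = false := by simp [hc]
      simp only [count_tabs_go, List.dropWhile_cons, hbeq, Bool.false_eq_true, if_false,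
        List.length_cons]
      by_cases h1 : (c == '#' || c == '\r' || c == '\n') = true
      · simp [h1]
      · by_cases h2 : (c == ' ') = true
        · simp [h1, h2]
        · simp only [h1, h2, Bool.false_eq_true, if_false]
          push_cast
          ring

-- ===== VERDICT (by name: the statement is the Claim_ definition above) =====
theorem count_tabs_spec : Claim_equal_count_tabs := by
  intro line _
  unfold Spec_count_tabs count_tabs count_tabs_alt
  rw [count_tabs_go_eq]
  rcases h : line.toList.dropWhile (· == '\t') with _ | ⟨f, t⟩ <;> simp [h]
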